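-- pv_equiv track=rewrite | github.com/AndreyBadyulya/learningPython | hw_12.py | get_planet_name
-- ===== SOURCE A (Python) =====
-- def get_planet_name(id):
--     # This doesn't work; Fix it!
--     name=""
--     for i in str(id):
--         if i=='1': name = "Mercury"
--         if i=='2': name = "Venus"
--         if i=='3': name = "Earth"
--         if i=='4': name = "Mars"
--         if i=='5': name = "Jupiter"
--         if i=='6': name = "Saturn"
--         if i=='7': name = "Uranus"
--         if i=='8': name = "Neptune"
--     return name
-- ===== SOURCE B (Python) =====
-- PLANETS = {'1': "Mercury", '2': "Venus", '3': "Earth", '4': "Mars",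
--            '5': "Jupiter", '6': "Saturn", '7': "Uranus", '8': "Neptune"}
--
-- def get_planet_name(id):
--     # the last digit 1-8 in str(id) wins, so scan in reverse and return early
--     for c in reversed(str(id)):
--         if c in PLANETS:
--             return PLANETS[c]
--     return ""
-- ===== Notes on version B (the rewrite author's own statement) =====
-- stated objective: alternative
-- what changed: Replaced A's keep-last accumulator over the whole digit string by an early-terminating reverse scan with a digit-to-planet table and no accumulator.
import Mathlib
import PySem

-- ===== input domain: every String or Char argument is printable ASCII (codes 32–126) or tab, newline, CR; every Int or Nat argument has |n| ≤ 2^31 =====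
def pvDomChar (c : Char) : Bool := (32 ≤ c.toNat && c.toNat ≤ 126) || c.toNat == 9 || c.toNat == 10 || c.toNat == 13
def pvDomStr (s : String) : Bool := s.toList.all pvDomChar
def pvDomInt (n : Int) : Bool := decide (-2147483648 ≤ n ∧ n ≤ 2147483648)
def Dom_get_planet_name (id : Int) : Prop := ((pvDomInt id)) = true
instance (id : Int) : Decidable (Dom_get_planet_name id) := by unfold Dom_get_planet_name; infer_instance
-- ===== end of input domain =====

-- B replaces A's keep-last accumulator by an early-returning reverse scan with a digit table (objective: alternative).

-- ===== PORT A =====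
-- A's loop body: eight independent ifs, each overwriting the accumulator.
def pvStepA (name : String) (i : Char) : String :=
  let name := if i == '1' then "Mercury" else name
  let name := if i == '2' then "Venus" else name
  let name := if i == '3' then "Earth" else name
  let name := if i == '4' then "Mars" else name
  let name := if i == '5' then "Jupiter" else name
  let name := if i == '6' then "Saturn" else name
  let name := if i == '7' then "Uranus" else name
  let name := if i == '8' then "Neptune" else name
  name

def get_planet_name (id : Int) : String :=
  (PySem.Int.toStr id).toList.foldl pvStepA ""

-- ===== PORT B =====
-- B's digit→planet table lookup (the PLANETS dict in Source B).
def pvPlanet? (c : Char) : Option String :=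
  if c == '1' then some "Mercury"
  else if c == '2' then some "Venus"
  else if c == '3' then some "Earth"
  else if c == '4' then some "Mars"
  else if c == '5' then some "Jupiter"
  else if c == '6' then some "Saturn"
  else if c == '7' then some "Uranus"
  else if c == '8' then some "Neptune"
  else none

-- B's loop: early return on the first matching char, "" if none.
def pvScanB : List Char → String
  | [] => ""
  | c :: r =>
    match pvPlanet? c with
    | some p => p
    | none => pvScanB r

def get_planet_name_alt (id : Int) : String :=
  pvScanB (PySem.Int.toStr id).toList.reverse

-- ===== PRECONDITION & SPEC =====
def Spec_get_planet_name (id : Int) (out : String) : Prop := out = get_planet_name_alt id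
instance (id : Int) (out : String) : Decidable (Spec_get_planet_name id out) := by unfold Spec_get_planet_name; infer_instance

-- ===== CLAIM (what is proved, stated in full; the proofs are below) =====
def Claim_equal_get_planet_name : Prop := ∀ (id : Int), Dom_get_planet_name id → Spec_get_planet_name id (get_planet_name id)

-- ===== LEMMAS AND PROOFS =====

-- B's scan generalized with an explicit default, to relate it to the fold.
def pvScanAcc (acc : String) : List Char → String
  | [] => acc
  | c :: r =>
    match pvPlanet? c with
    | some p => p
    | none => pvScanAcc acc r

theorem pvScanAcc_empty (l : List Char) : pvScanAcc "" l = pvScanB l := by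
  induction l with
  | nil => rfl
  | cons c r ih =>
    simp only [pvScanAcc, pvScanB]
    cases pvPlanet? c <;> simp [ih]

theorem pvStepA_eq (acc : String) (c : Char) :
    pvStepA acc c = match pvPlanet? c with | some p => p | none => acc := by
  simp only [pvStepA, pvPlanet?]
  split_ifs <;> simp_all

theorem pvScanAcc_snoc (m : List Char) (acc : String) (c : Char) :
    pvScanAcc acc (m ++ [c]) = pvScanAcc (pvStepA acc c) m := by
  induction m with
  | nil => simp [pvScanAcc, pvStepA_eq]
  | cons d r ih =>
    simp only [List.cons_append, pvScanAcc]
    cases pvPlanet? d <;> simp [ih]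

theorem pvFold_eq_scan (l : List Char) (acc : String) :
    l.foldl pvStepA acc = pvScanAcc acc l.reverse := by
  induction l generalizing acc with
  | nil => rfl
  | cons c r ih =>
    simp only [List.foldl_cons, List.reverse_cons]
    rw [ih, pvScanAcc_snoc]

-- ===== VERDICT (by name: the statement is the Claim_ definition above) =====
theorem get_planet_name_spec : Claim_equal_get_planet_name := by
  intro id _
  unfold Spec_get_planet_name get_planet_name get_planet_name_alt
  rw [pvFold_eq_scan, pvScanAcc_empty]
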